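-- pv_equiv track=rewrite | github.com/tjsander/advent2023 | day7/day7.py | score_type_joker
-- ===== SOURCE A (Python) =====
-- def score_type_joker(hand_str):
--
--     # With Stringsub hax jokers are now 1
--     occurrences = []
--     hand = list(hand_str)
--     hand.sort()
--
--     wildcards = hand.count('1')
--     if (wildcards > 0):
--         for i in range (0,wildcards):
--             hand.remove('1')
--     duplicates = 1
--     for i in range (0,len(hand)-1):
--         if hand[i] != hand[i+1]:
--             occurrences.append(duplicates)
--             duplicates = 1
--         else:
--             duplicates += 1
--     occurrences.append(duplicates)
--     occurrences.sort(reverse=True)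
--     occurrences[0] += wildcards
--
--     if (occurrences[0] >= 5): return 7
--     if (occurrences[0] == 4): return 6
--     if (occurrences[0] == 3):
--         if (occurrences[1] == 2): return 5
--         if (occurrences[1] == 1): return 4
--     if (occurrences[0] == 2):
--         if (occurrences[1] == 2): return 3
--         if (occurrences[1] == 1): return 2
--     if (occurrences[0] == 1): return 1
--     return 1
-- ===== SOURCE B (Python) =====
-- def score_type_joker(hand_str):
--     # One pass: tally non-joker cards in a dict and count jokers, instead of
--     # sort + remove-loop + adjacent-run scan.
--     counts = {}
--     wildcards = 0
--     for c in hand_str: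
--         if c == '1':
--             wildcards += 1
--         else:
--             counts[c] = counts.get(c, 0) + 1
--     vals = sorted(counts.values(), reverse=True)
--     if not vals:
--         vals = [1]
--     vals[0] += wildcards
--
--     if (vals[0] >= 5): return 7
--     if (vals[0] == 4): return 6
--     if (vals[0] == 3):
--         if (vals[1] == 2): return 5
--         if (vals[1] == 1): return 4
--     if (vals[0] == 2):
--         if (vals[1] == 2): return 3
--         if (vals[1] == 1): return 2
--     if (vals[0] == 1): return 1
--     return 1
-- ===== Notes on version B (the rewrite author's own statement) =====
-- stated objective: simpler
-- what changed: Replaces A's sort + joker-remove loop + adjacent-run scan over the sorted hand by a single pass that tallies non-joker cards in a dict while counting jokers, then sorts only the tally values descending; the branch ladder is unchanged.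
import Mathlib
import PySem

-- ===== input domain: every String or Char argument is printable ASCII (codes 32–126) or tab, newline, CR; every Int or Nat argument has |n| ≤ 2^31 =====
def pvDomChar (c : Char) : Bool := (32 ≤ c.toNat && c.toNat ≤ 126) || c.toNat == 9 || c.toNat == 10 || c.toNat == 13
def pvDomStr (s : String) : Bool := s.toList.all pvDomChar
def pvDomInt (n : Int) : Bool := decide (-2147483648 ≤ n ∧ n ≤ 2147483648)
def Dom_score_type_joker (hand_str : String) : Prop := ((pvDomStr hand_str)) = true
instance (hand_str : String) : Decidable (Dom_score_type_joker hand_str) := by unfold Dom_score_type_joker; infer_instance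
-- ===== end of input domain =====

-- B replaces A's sort + joker-removal loop + adjacent-run scan by a single
-- pass tallying non-joker cards in a dict while counting jokers (simpler).

-- ===== PORT A =====
-- the 'for i in range(0,len(hand)-1)' adjacent-run scan, as structural
-- recursion over the same adjacent pairs with the same (occurrences, duplicates) state
def runsA : List Char → Int → List Int → List Int
  | a :: b :: rest, dup, occ =>
    if a ≠ b then runsA (b :: rest) 1 (occ ++ [dup])
    else runsA (b :: rest) (dup + 1) occ
  | _, dup, occ => occ ++ [dup]

def score_type_joker (hand_str : String) : Int :=
  let hand := PySem.List.sorted hand_str.toList (fun x => x) false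
  let wildcards : Int := (hand.count '1' : Int)
  let hand2 :=
    if wildcards > 0 then
      (PySem.List.pyRange 0 wildcards 1).foldl
        (fun h _ => (PySem.List.remove? h '1').getD h) hand
    else hand
  let occurrences := PySem.List.sorted (runsA hand2 1 []) (fun x => x) true
  -- occurrences[0] += wildcards (the list is never empty here)
  let occ2 := match occurrences with
    | [] => ([] : List Int)
    | x :: r => (x + wildcards) :: r
  let v0 := (PySem.List.pyGet? occ2 0).getD 0
  let v1 := (PySem.List.pyGet? occ2 1).getD 0   -- IndexError excluded by Pre_
  if v0 ≥ 5 then 7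
  else if v0 = 4 then 6
  else if v0 = 3 ∧ v1 = 2 then 5
  else if v0 = 3 ∧ v1 = 1 then 4
  else if v0 = 2 ∧ v1 = 2 then 3
  else if v0 = 2 ∧ v1 = 1 then 2
  else if v0 = 1 then 1
  else 1

-- ===== PORT B =====
-- the single 'for c in hand_str' loop with its (counts, wildcards) state
def loopB : List Char → PySem.Dict Char Int × Int → PySem.Dict Char Int × Int
  | [], st => st
  | c :: rest, (d, w) =>
    if c = '1' then loopB rest (d, w + 1)
    else loopB rest (d.insert c (d.getD c 0 + 1), w)

def score_type_joker_alt (hand_str : String) : Int :=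
  let st := loopB hand_str.toList (PySem.Dict.empty, 0)
  let vals := PySem.List.sorted st.1.values (fun x => x) true
  let vals2 := if vals.isEmpty then [1] else vals
  let vals3 := match vals2 with
    | [] => ([] : List Int)
    | x :: r => (x + st.2) :: r
  let v0 := (PySem.List.pyGet? vals3 0).getD 0
  let v1 := (PySem.List.pyGet? vals3 1).getD 0  -- IndexError excluded by Pre_
  if v0 ≥ 5 then 7
  else if v0 = 4 then 6
  else if v0 = 3 ∧ v1 = 2 then 5
  else if v0 = 3 ∧ v1 = 1 then 4
  else if v0 = 2 ∧ v1 = 2 then 3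
  else if v0 = 2 ∧ v1 = 1 then 2
  else if v0 = 1 then 1
  else 1

-- ===== PRECONDITION & SPEC =====
-- Pre_ excludes exactly the inputs on which Python A raises IndexError
-- (occurrences[1] read off a one-element occurrence list: at most one distinct
-- non-joker card and a top multiplicity-plus-jokers of 2 or 3); B raises there too.
def Pre_score_type_joker (hand_str : String) : Prop :=
  ¬ ((PySem.List.dedup (hand_str.toList.filter (fun c => c ≠ '1'))).length ≤ 1 ∧
     ((if hand_str.toList.filter (fun c => c ≠ '1') = [] then
         1 + (hand_str.toList.length : Int)
       else (hand_str.toList.length : Int)) = 2 ∨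
      (if hand_str.toList.filter (fun c => c ≠ '1') = [] then
         1 + (hand_str.toList.length : Int)
       else (hand_str.toList.length : Int)) = 3))
instance (hand_str : String) : Decidable (Pre_score_type_joker hand_str) := by
  unfold Pre_score_type_joker; infer_instance

def pvWitness_score_type_joker : String := "23456"

def Spec_score_type_joker (hand_str : String) (out : Int) : Prop := out = score_type_joker_alt hand_str
instance (hand_str : String) (out : Int) : Decidable (Spec_score_type_joker hand_str out) := by unfold Spec_score_type_joker; infer_instance

-- ===== CLAIM (what is proved, stated in full; the proofs are below) =====
def Claim_equal_score_type_joker : Prop := ∀ (hand_str : String), Dom_score_type_joker hand_str → Pre_score_type_joker hand_str → Spec_score_type_joker hand_str (score_type_joker hand_str)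

-- ===== LEMMAS AND PROOFS =====

-- multiplicity list in first-occurrence order: what both pipelines boil down to
def gvals (s : List Char) : List Int :=
  (PySem.Set.ofList s).map (fun c => (s.count c : Int))

-- A's run scan without its accumulator
def runs' : List Char → Int → List Int
  | a :: b :: rest, dup =>
    if a ≠ b then dup :: runs' (b :: rest) 1
    else runs' (b :: rest) (dup + 1)
  | _, dup => [dup]

theorem runsA_eq_runs' : ∀ (s : List Char) (d : Int) (occ : List Int),
    runsA s d occ = occ ++ runs' s d := by
  intro s
  induction s with
  | nil => intro d occ; simp [runsA, runs']
  | cons a t ih =>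
    intro d occ
    cases t with
    | nil => simp [runsA, runs']
    | cons b r =>
      by_cases h : a = b
      · simp [runsA, runs', h, ih]
      · simp [runsA, runs', h, ih]

def eraseStep (c : Char) (acc : List Char) : List Char :=
  (PySem.List.remove? acc c).getD acc

theorem eraseStep_eq (c : Char) (acc : List Char) :
    eraseStep c acc = if c ∈ acc then acc.erase c else acc := by
  by_cases h : c ∈ acc
  · simp [eraseStep, PySem.List.remove?_eq_some_erase _ _ h, h]
  · simp [eraseStep, (PySem.List.remove?_eq_none_iff _ _).2 h, h]

theorem eraseStep_cons_ne (c x : Char) (hx : x ≠ c) : ∀ (n : Nat) (t : List Char),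
    (eraseStep c)^[n] (x :: t) = x :: (eraseStep c)^[n] t := by
  intro n
  induction n with
  | zero => simp
  | succ n ih =>
    intro t
    have hstep : eraseStep c (x :: t) = x :: eraseStep c t := by
      by_cases h : c ∈ t
      · rw [eraseStep_eq, eraseStep_eq]
        have hxc : ¬ (x = c) := hx
        simp [h, hxc]
      · rw [eraseStep_eq, eraseStep_eq]
        have hcx : ¬ (c = x) := fun hc => hx hc.symm
        simp [h, hcx]
    rw [Function.iterate_succ_apply, Function.iterate_succ_apply, hstep, ih]

theorem iterate_count_erase (c : Char) : ∀ (h : List Char),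
    (eraseStep c)^[h.count c] h = h.filter (fun x => x ≠ c) := by
  intro h
  induction h with
  | nil => simp
  | cons x t ih =>
    by_cases hx : x = c
    · subst hx
      have : (x :: t).count x = t.count x + 1 := by simp
      rw [this, Function.iterate_succ_apply]
      have : eraseStep x (x :: t) = t := by
        rw [eraseStep_eq]; simp
      rw [this]
      simpa using ih
    · have : (x :: t).count c = t.count c := by simp [hx]
      rw [this, eraseStep_cons_ne c x hx]
      simp [hx, ih]

theorem foldl_ignore {α β : Type} (f : α → α) : ∀ (L : List β) (x : α),
    L.foldl (fun a _ => f a) x = f^[L.length] x := by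
  intro L
  induction L with
  | nil => simp
  | cons y L ih => intro x; simp [List.foldl_cons, ih, Function.iterate_succ_apply]

theorem ofList_filter (a : Char) : ∀ (t : List Char),
    PySem.Set.ofList (t.filter (fun y => y ≠ a)) =
      (PySem.Set.ofList t).filter (fun y => !(y == a)) := by
  intro t
  induction t with
  | nil => simp [PySem.Set.ofList]
  | cons x r ih =>
    by_cases hx : x = a
    · subst hx
      have h1 : (x :: r).filter (fun y => decide (y ≠ x)) = r.filter (fun y => decide (y ≠ x)) := by
        simp
      rw [h1, ih, PySem.Set.ofList_cons]
      simp only [PySem.Set.discard, List.filter_cons]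
      have hxx : (!(x == x)) = false := by simp
      rw [hxx]
      simp only [Bool.false_eq_true, if_false]
      rw [List.filter_filter]
      apply (List.filter_congr ?_).symm
      intro y _
      simp [Bool.and_self]
    · have h1 : (x :: r).filter (fun y => decide (y ≠ a)) = x :: r.filter (fun y => decide (y ≠ a)) := by
        simp [hx]
      rw [h1, PySem.Set.ofList_cons, PySem.Set.ofList_cons]
      simp only [PySem.Set.discard]
      rw [ih, List.filter_filter]
      have hxa : (!(x == a)) = true := by simp [hx]
      simp only [List.filter_cons, hxa, if_true]
      rw [List.filter_filter]
      congr 1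
      apply List.filter_congr
      intro y _
      simp [Bool.and_comm]

theorem gvals_cons (a : Char) (t : List Char) :
    gvals (a :: t) = (((a :: t).count a : Nat) : Int) :: gvals (t.filter (fun y => y ≠ a)) := by
  unfold gvals
  rw [PySem.Set.ofList_cons]
  simp only [PySem.Set.discard, List.map_cons]
  congr 1
  rw [ofList_filter]
  apply List.map_congr_left
  intro c hc
  have hca : c ≠ a := by
    have := List.of_mem_filter hc
    simpa using this
  have hac : a ≠ c := fun h => hca h.symm
  have h1 : (a :: t).count c = t.count c := by simp [hac]
  have h2 : (t.filter (fun y => y ≠ a)).count c = t.count c := by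
    apply List.count_filter; simp [hca]
  rw [h1, h2]

theorem runs'_sorted (a : Char) : ∀ (t : List Char) (d : Int),
    (a :: t).Pairwise (· ≤ ·) →
    runs' (a :: t) d = (d + (t.count a : Int)) :: gvals (t.filter (fun y => y ≠ a)) := by
  intro t
  induction t generalizing a with
  | nil => intro d _; simp [runs', gvals]
  | cons b r ih =>
    intro d hp
    by_cases hab : a = b
    · subst hab
      have : runs' (a :: a :: r) d = runs' (a :: r) (d + 1) := by simp [runs']
      rw [this, ih a (d + 1) hp.of_cons]
      have hc : (a :: r).count a = r.count a + 1 := by simp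
      have hf : (a :: r).filter (fun y => y ≠ a) = r.filter (fun y => y ≠ a) := by simp
      rw [hc, hf]
      congr 1
      push_cast
      ring
    · have hstep : runs' (a :: b :: r) d = d :: runs' (b :: r) 1 := by simp [runs', hab]
      have hnotin : a ∉ b :: r := by
        intro hmem
        have hfa := (List.pairwise_cons.1 hp).1
        have hge : a ≤ b := hfa b (by simp)
        rcases List.mem_cons.1 hmem with h | h
        · exact hab h
        · have hfb := (List.pairwise_cons.1 (List.pairwise_cons.1 hp).2).1
          have : b ≤ a := hfb a h
          exact hab (le_antisymm hge this)
      have hc0 : (b :: r).count a = 0 := List.count_eq_zero.2 hnotin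
      have hfid : (b :: r).filter (fun y => y ≠ a) = b :: r := by
        rw [List.filter_eq_self]
        intro y hy
        have : y ≠ a := fun h => hnotin (by rw [← h]; exact hy)
        simpa using this
      rw [hstep, ih b 1 hp.of_cons, hc0, hfid, gvals_cons]
      have hcnt : (((b :: r).count b : Nat) : Int) = 1 + (r.count b : Int) := by
        simp [List.count_cons_self]
        ring
      rw [hcnt]
      simp

theorem gvals_perm {l l' : List Char} (h : l.Perm l') : (gvals l).Perm (gvals l') := by
  unfold gvals
  have hd : (PySem.Set.ofList l).Perm (PySem.Set.ofList l') := by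
    rw [List.perm_ext_iff_of_nodup (PySem.Set.nodup_ofList l) (PySem.Set.nodup_ofList l')]
    intro a
    rw [PySem.Set.mem_ofList, PySem.Set.mem_ofList]
    exact h.mem_iff
  have := hd.map (fun c => ((l.count c : Nat) : Int))
  refine this.trans ?_
  have : (PySem.Set.ofList l').map (fun c => ((l.count c : Nat) : Int)) =
      (PySem.Set.ofList l').map (fun c => ((l'.count c : Nat) : Int)) := by
    apply List.map_congr_left
    intro c _
    rw [h.count_eq]
  rw [this]

theorem sortedRevInt_eq_of_perm {l l' : List Int} (h : l.Perm l') :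
    PySem.List.sorted l (fun x => x) true = PySem.List.sorted l' (fun x => x) true := by
  apply List.eq_of_perm_of_sorted
  · intro a b _ _ h1 h2
    exact le_antisymm h2 h1
  · exact PySem.List.sorted_pairwise_rev l (fun x => x)
  · exact PySem.List.sorted_pairwise_rev l' (fun x => x)
  · exact (PySem.List.sorted_perm l _ _).trans (h.trans (PySem.List.sorted_perm l' _ _).symm)

theorem loopB_spec : ∀ (l : List Char) (d : PySem.Dict Char Int) (w : Int),
    loopB l (d, w) =
      ((l.filter (fun c => c ≠ '1')).foldl (fun d c => d.insert c (d.getD c 0 + 1)) d,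
       w + (l.count '1' : Int)) := by
  intro l
  induction l with
  | nil => intro d w; simp [loopB]
  | cons c rest ih =>
    intro d w
    by_cases hc : c = '1'
    · subst hc
      have hstep : loopB ('1' :: rest) (d, w) = loopB rest (d, w + 1) := by
        simp [loopB]
      rw [hstep, ih]
      have : ('1' :: rest).count '1' = rest.count '1' + 1 := by simp
      rw [this]
      have : ('1' :: rest).filter (fun c => c ≠ '1') = rest.filter (fun c => c ≠ '1') := by simp
      rw [this]
      congr 1
      push_cast
      ring
    · have hstep : loopB (c :: rest) (d, w) = loopB rest (d.insert c (d.getD c 0 + 1), w) := by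
        simp [loopB, hc]
      rw [hstep, ih]
      have h1 : (c :: rest).filter (fun x => x ≠ '1') = c :: rest.filter (fun x => x ≠ '1') := by
        simp [hc]
      have h2 : (c :: rest).count '1' = rest.count '1' := by
        simp [hc]
      rw [h1, h2]
      simp

theorem values_counter (m : List Char) : (PySem.Dict.counter m).values = gvals m := by
  unfold PySem.Dict.values gvals
  rw [PySem.Dict.items_counter]
  rw [List.map_map]
  rfl

-- the shared tail of both ports (head-add and branch ladder), for the proofs
def finish (occ : List Int) (w : Int) : Int :=
  let occ2 := match occ with
    | [] => ([] : List Int)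
    | x :: r => (x + w) :: r
  let v0 := (PySem.List.pyGet? occ2 0).getD 0
  let v1 := (PySem.List.pyGet? occ2 1).getD 0
  if v0 ≥ 5 then 7
  else if v0 = 4 then 6
  else if v0 = 3 ∧ v1 = 2 then 5
  else if v0 = 3 ∧ v1 = 1 then 4
  else if v0 = 2 ∧ v1 = 2 then 3
  else if v0 = 2 ∧ v1 = 1 then 2
  else if v0 = 1 then 1
  else 1

theorem portA_norm (s : String) :
    score_type_joker s =
      finish
        (PySem.List.sorted
          (runsA
            (if ((PySem.List.sorted s.toList (fun x => x) false).count '1' : Int) > 0 then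
              (PySem.List.pyRange 0 ((PySem.List.sorted s.toList (fun x => x) false).count '1' : Int) 1).foldl
                (fun h _ => (PySem.List.remove? h '1').getD h)
                (PySem.List.sorted s.toList (fun x => x) false)
             else PySem.List.sorted s.toList (fun x => x) false)
            1 [])
          (fun x => x) true)
        ((PySem.List.sorted s.toList (fun x => x) false).count '1' : Int) := rfl

theorem portB_norm (s : String) :
    score_type_joker_alt s =
      finish
        (if (PySem.List.sorted (loopB s.toList (PySem.Dict.empty, 0)).1.values (fun x => x) true).isEmpty then
            [1]
         else PySem.List.sorted (loopB s.toList (PySem.Dict.empty, 0)).1.values (fun x => x) true)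
        (loopB s.toList (PySem.Dict.empty, 0)).2 := rfl

-- ===== VERDICT (by name: the statement is the Claim_ definition above) =====
theorem gvals_ne_nil {m : List Char} (hm : m ≠ []) : gvals m ≠ [] := by
  unfold gvals
  intro h
  rcases m with _ | ⟨a, t⟩
  · exact hm rfl
  · have ha : a ∈ PySem.Set.ofList (a :: t) := (PySem.Set.mem_ofList _ _).2 (by simp)
    rw [List.map_eq_nil_iff.1 h] at ha
    exact (List.not_mem_nil).elim ha

theorem runs'_eq_gvals {h2 : List Char} (hne : h2 ≠ []) (hp : h2.Pairwise (· ≤ ·)) :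
    runs' h2 1 = gvals h2 := by
  rcases h2 with _ | ⟨a, t⟩
  · exact (hne rfl).elim
  · rw [runs'_sorted a t 1 hp, gvals_cons]
    congr 1
    simp [List.count_cons_self]
    ring

theorem score_type_joker_spec : Claim_equal_score_type_joker := by
  intro s _ _
  unfold Spec_score_type_joker
  rw [portA_norm, portB_norm]
  have hw : ((PySem.List.sorted s.toList (fun x => x) false).count '1' : Int)
      = (s.toList.count '1' : Int) := by
    exact_mod_cast congrArg Nat.cast
      ((PySem.List.sorted_perm s.toList (fun x => x) false).count_eq '1')
  -- the joker-removal loop strips exactly the '1's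
  have hh2 : (if ((PySem.List.sorted s.toList (fun x => x) false).count '1' : Int) > 0 then
        (PySem.List.pyRange 0 ((PySem.List.sorted s.toList (fun x => x) false).count '1' : Int) 1).foldl
          (fun h _ => (PySem.List.remove? h '1').getD h)
          (PySem.List.sorted s.toList (fun x => x) false)
      else PySem.List.sorted s.toList (fun x => x) false)
      = (PySem.List.sorted s.toList (fun x => x) false).filter (fun x => x ≠ '1') := by
    by_cases h0 : ((PySem.List.sorted s.toList (fun x => x) false).count '1' : Int) > 0
    · rw [if_pos h0]
      have hfold := foldl_ignore (eraseStep '1')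
        (PySem.List.pyRange 0 ((PySem.List.sorted s.toList (fun x => x) false).count '1' : Int) 1)
        (PySem.List.sorted s.toList (fun x => x) false)
      rw [show (fun (h : List Char) (_ : Int) => (PySem.List.remove? h '1').getD h)
          = (fun a _ => eraseStep '1' a) from rfl, hfold, PySem.List.length_pyRange_one]
      have hn : (((PySem.List.sorted s.toList (fun x => x) false).count '1' : Int) - 0).toNat
          = (PySem.List.sorted s.toList (fun x => x) false).count '1' := by omega
      rw [hn, iterate_count_erase]
    · rw [if_neg h0]
      have hc0 : (PySem.List.sorted s.toList (fun x => x) false).count '1' = 0 := by omega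
      have hnot : '1' ∉ PySem.List.sorted s.toList (fun x => x) false := by
        rw [← List.count_eq_zero]; exact hc0
      symm
      rw [List.filter_eq_self]
      intro a ha
      have : a ≠ '1' := fun h => hnot (h ▸ ha)
      simpa using this
  rw [hh2]
  have hperm : ((PySem.List.sorted s.toList (fun x => x) false).filter (fun x => x ≠ '1')).Perm
      (s.toList.filter (fun x => x ≠ '1')) :=
    (PySem.List.sorted_perm s.toList (fun x => x) false).filter _
  have hpair : ((PySem.List.sorted s.toList (fun x => x) false).filter (fun x => x ≠ '1')).Pairwise
      (· ≤ ·) := by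
    have h := PySem.List.sorted_pairwise s.toList (fun x => x)
    exact h.filter _
  have hB := loopB_spec s.toList PySem.Dict.empty 0
  have hvalsB : (loopB s.toList (PySem.Dict.empty, 0)).1.values
      = gvals (s.toList.filter (fun c => c ≠ '1')) := by
    rw [hB, PySem.Dict.foldl_insert_getD_add_one_eq_counter]
    exact values_counter _
  have hwB : (loopB s.toList (PySem.Dict.empty, 0)).2 = (s.toList.count '1' : Int) := by
    rw [hB]; simp
  rw [hvalsB, hwB, hw]
  by_cases hme : s.toList.filter (fun c => c ≠ '1') = []
  · have h2e : (PySem.List.sorted s.toList (fun x => x) false).filter (fun x => x ≠ '1') = [] :=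
      (hme ▸ hperm).eq_nil
    rw [h2e, hme]
    rfl
  · have h2ne : (PySem.List.sorted s.toList (fun x => x) false).filter (fun x => x ≠ '1') ≠ [] := by
      intro h
      exact hme ((h ▸ hperm).symm.eq_nil)
    rw [runsA_eq_runs', List.nil_append, runs'_eq_gvals h2ne hpair]
    have hsorteq : PySem.List.sorted
        (gvals ((PySem.List.sorted s.toList (fun x => x) false).filter (fun x => x ≠ '1')))
        (fun x => x) true
        = PySem.List.sorted (gvals (s.toList.filter (fun c => c ≠ '1'))) (fun x => x) true :=
      sortedRevInt_eq_of_perm (gvals_perm hperm)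
    rw [hsorteq]
    have hnonnil : PySem.List.sorted (gvals (s.toList.filter (fun c => c ≠ '1')))
        (fun x => x) true ≠ [] := by
      intro h
      exact gvals_ne_nil hme ((PySem.List.sorted_eq_nil_iff _ _ _).1 h)
    rw [if_neg (by simpa [List.isEmpty_iff] using hnonnil)]
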